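-- pv_equiv track=rewrite | github.com/neo128/Zotero-AI-Toolbox | scripts/sync_zotero_to_notion.py | match_tags
-- ===== SOURCE A (Python) =====
-- from typing import Any, Dict, Iterable, List, Optional, Tuple
--
-- def match_tags(title: str, abstract: str, key_to_keywords: Dict[str, List[str]], key_to_label: Dict[str, str]) -> List[str]:
--     text = f"{(title or '').lower()} {(abstract or '').lower()}"
--     tags: List[str] = []
--     for key, keywords in key_to_keywords.items():
--         for kw in keywords:
--             if kw and kw.lower() in text:
--                 label = key_to_label.get(key) or key
--                 tags.append(label)
--                 break
--     return tags
-- ===== SOURCE B (Python) =====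
-- def match_tags(title, abstract, key_to_keywords, key_to_label):
--     text = f"{(title or '').lower()} {(abstract or '').lower()}"
--     # group the distinct lowered keywords by length
--     by_len = {}
--     for key, kws in key_to_keywords.items():
--         for kw in kws:
--             if kw:
--                 k = kw.lower()
--                 by_len.setdefault(len(k), set()).add(k)
--     # single scan of the text: at each start position probe one slice per pattern length
--     found = set()
--     items = list(by_len.items())
--     for i in range(len(text)):
--         for L, pats in items:
--             sub = text[i:i+L]
--             if sub in pats:
--                 found.add(sub)
--     return [key_to_label.get(key) or key
--             for key, kws in key_to_keywords.items()
--             if any(kw and kw.lower() in found for kw in kws)]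
-- ===== Notes on version B (the rewrite author's own statement) =====
-- stated objective: faster
-- what changed: Replaces A's per-key keyword scans (each keyword substring-searched in the text, with a break on the first hit) by a single-pass multi-pattern scan: distinct lowered keywords are grouped by length into hash sets, one pass over the text probes the slice of each pattern length at every position to collect the set of keywords that occur, and keys are then selected by set-membership only.
import Mathlib
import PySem

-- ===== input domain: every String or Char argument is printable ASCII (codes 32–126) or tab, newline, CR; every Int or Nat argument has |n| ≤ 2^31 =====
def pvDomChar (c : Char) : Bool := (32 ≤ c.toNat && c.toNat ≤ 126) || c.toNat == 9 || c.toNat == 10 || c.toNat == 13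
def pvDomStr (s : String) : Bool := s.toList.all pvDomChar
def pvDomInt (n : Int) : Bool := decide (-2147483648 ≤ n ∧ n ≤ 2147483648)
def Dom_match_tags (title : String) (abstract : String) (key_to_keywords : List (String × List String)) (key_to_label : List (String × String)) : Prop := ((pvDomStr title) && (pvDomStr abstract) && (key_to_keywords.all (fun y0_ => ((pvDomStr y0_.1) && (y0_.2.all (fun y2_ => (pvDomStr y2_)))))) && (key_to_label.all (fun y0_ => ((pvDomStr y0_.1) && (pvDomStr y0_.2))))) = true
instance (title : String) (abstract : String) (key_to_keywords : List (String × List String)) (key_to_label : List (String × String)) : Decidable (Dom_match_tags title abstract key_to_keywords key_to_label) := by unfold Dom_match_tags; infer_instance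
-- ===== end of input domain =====

-- B replaces A's per-key keyword scans by one pass over the text: distinct lowered keywords are grouped by length into hash sets, each text position probes one slice per pattern length to build the set of occurring keywords, and keys are then selected by set membership; objective: faster (constant-factor: each distinct keyword is never substring-scanned, the text is scanned once).


-- ===== PORT A =====
-- 'key_to_label.get(key) or key'
def matchTagsLabel (key_to_label : List (String × String)) (key : String) : String :=
  match PySem.Dict.get? (PySem.Dict.mk key_to_label) key with
  | some v => if v = "" then key else v
  | none => key

-- inner 'for kw in keywords: … break' loop of A
def matchTagsInner (text : String) (key_to_label : List (String × String)) (key : String) (tags : List String) : List String → List String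
  | [] => tags
  | kw :: rest =>
    if kw ≠ "" && PySem.Str.isIn (PySem.Str.lower kw) text then
      tags ++ [matchTagsLabel key_to_label key]
    else
      matchTagsInner text key_to_label key tags rest

-- outer 'for key, keywords in key_to_keywords.items()' loop of A
def matchTagsOuter (text : String) (key_to_label : List (String × String)) (tags : List String) : List (String × List String) → List String
  | [] => tags
  | (key, keywords) :: rest =>
    matchTagsOuter text key_to_label (matchTagsInner text key_to_label key tags keywords) rest

def match_tags (title : String) (abstract : String) (key_to_keywords : List (String × List String)) (key_to_label : List (String × String)) : List String :=
  let text := PySem.Str.lower title ++ " " ++ PySem.Str.lower abstract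
  matchTagsOuter text key_to_label [] key_to_keywords

-- ===== PORT B =====
-- 'key_to_label.get(key) or key' (B side)
def matchTagsAltLabel (key_to_label : List (String × String)) (key : String) : String :=
  match PySem.Dict.get? (PySem.Dict.mk key_to_label) key with
  | some v => if v = "" then key else v
  | none => key

-- 'by_len.setdefault(len(k), set()).add(k)' over both loops: distinct lowered keywords grouped by length
def matchTagsByLen (key_to_keywords : List (String × List String)) : PySem.Dict Int (PySem.Set String) :=
  key_to_keywords.foldl
    (fun d p => p.2.foldl
      (fun d kw => if kw = "" then d else
        let k := PySem.Str.lower kw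
        PySem.Dict.modify d (PySem.Str.len k) PySem.Set.empty (fun s => PySem.Set.add s k))
      d)
    PySem.Dict.empty

-- 'for L, pats in items: sub = text[i:i+L]; if sub in pats: found.add(sub)' at one position i
def matchTagsScanPos (items : List (Int × PySem.Set String)) (text : String) (found : PySem.Set String) (i : Int) : PySem.Set String :=
  items.foldl
    (fun s q =>
      let sub := PySem.Str.slice text (some i) (some (i + q.1))
      if PySem.Set.contains q.2 sub then PySem.Set.add s sub else s)
    found

-- 'for i in range(len(text)): …' — the single scan of the text
def matchTagsFound (text : String) (items : List (Int × PySem.Set String)) : PySem.Set String :=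
  (PySem.List.pyRange 0 (PySem.Str.len text)).foldl (matchTagsScanPos items text) PySem.Set.empty

def match_tags_alt (title : String) (abstract : String) (key_to_keywords : List (String × List String)) (key_to_label : List (String × String)) : List String :=
  let text := PySem.Str.lower title ++ " " ++ PySem.Str.lower abstract
  let found := matchTagsFound text (matchTagsByLen key_to_keywords).items
  (key_to_keywords.filter
      (fun p => p.2.any (fun kw => kw ≠ "" && PySem.Set.contains found (PySem.Str.lower kw)))).map
    (fun p => matchTagsAltLabel key_to_label p.1)

-- ===== PRECONDITION & SPEC =====
def Spec_match_tags (title : String) (abstract : String) (key_to_keywords : List (String × List String)) (key_to_label : List (String × String)) (out : List String) : Prop := out = match_tags_alt title abstract key_to_keywords key_to_label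
instance (title : String) (abstract : String) (key_to_keywords : List (String × List String)) (key_to_label : List (String × String)) (out : List String) : Decidable (Spec_match_tags title abstract key_to_keywords key_to_label out) := by unfold Spec_match_tags; infer_instance

-- ===== CLAIM (what is proved, stated in full; the proofs are below) =====
def Claim_equal_match_tags : Prop := ∀ (title : String) (abstract : String) (key_to_keywords : List (String × List String)) (key_to_label : List (String × String)), Dom_match_tags title abstract key_to_keywords key_to_label → Spec_match_tags title abstract key_to_keywords key_to_label (match_tags title abstract key_to_keywords key_to_label)

-- ===== LEMMAS AND PROOFS =====
theorem matchTagsLabel_eq_alt (key_to_label : List (String × String)) (key : String) :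
    matchTagsLabel key_to_label key = matchTagsAltLabel key_to_label key := rfl

-- A's inner break loop = "some keyword matches the text"
theorem matchTagsInner_eq (text : String) (key_to_label : List (String × String)) (key : String)
    (tags : List String) (kws : List String) :
    matchTagsInner text key_to_label key tags kws =
      if kws.any (fun kw => kw ≠ "" && PySem.Str.isIn (PySem.Str.lower kw) text) then
        tags ++ [matchTagsAltLabel key_to_label key]
      else tags := by
  induction kws with
  | nil => simp [matchTagsInner]
  | cons kw rest ih =>
    simp only [matchTagsInner, List.any_cons]
    simp only [ih]
    by_cases h : (kw ≠ "" && PySem.Str.isIn (PySem.Str.lower kw) text) = true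
    · rw [if_pos h, if_pos (by simp only [h, Bool.true_or]), matchTagsLabel_eq_alt]
    · simp only [Bool.not_eq_true] at h
      simp only [h, Bool.false_or, Bool.false_eq_true, if_false]

-- A's outer loop = filter by "some keyword in text", then map to labels
theorem matchTagsOuter_eq (text : String) (key_to_label : List (String × String))
    (tags : List String) (l : List (String × List String)) :
    matchTagsOuter text key_to_label tags l =
      tags ++ (l.filter
          (fun p => p.2.any (fun kw => kw ≠ "" && PySem.Str.isIn (PySem.Str.lower kw) text))).map
        (fun p => matchTagsAltLabel key_to_label p.1) := by
  induction l generalizing tags with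
  | nil => simp [matchTagsOuter]
  | cons p rest ih =>
    obtain ⟨key, kws⟩ := p
    simp only [matchTagsOuter, ih, matchTagsInner_eq, List.filter_cons]
    by_cases h : (kws.any (fun kw => kw ≠ "" && PySem.Str.isIn (PySem.Str.lower kw) text)) = true
    · simp only [h, if_true, List.map_cons, List.append_assoc, List.singleton_append]
    · simp only [Bool.not_eq_true] at h
      simp only [h, Bool.false_eq_true, if_false]

-- the flattened list of lowered non-empty keywords of the grouping's double loop
def mtCands (key_to_keywords : List (String × List String)) : List String :=
  key_to_keywords.flatMap
    (fun q => q.2.filterMap (fun kw => if kw = "" then none else some (PySem.Str.lower kw)))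

-- one step of the grouping fold
def mtStep (d : PySem.Dict Int (PySem.Set String)) (k : String) : PySem.Dict Int (PySem.Set String) :=
  PySem.Dict.modify d (PySem.Str.len k) PySem.Set.empty (fun s => PySem.Set.add s k)

-- inner fold of the grouping = fold of mtStep over the filtered lowered keywords
theorem byLen_inner_eq (kws : List String) (d : PySem.Dict Int (PySem.Set String)) :
    kws.foldl
        (fun d kw => if kw = "" then d else
          let k := PySem.Str.lower kw
          PySem.Dict.modify d (PySem.Str.len k) PySem.Set.empty (fun s => PySem.Set.add s k))
        d
      = (kws.filterMap (fun kw => if kw = "" then none else some (PySem.Str.lower kw))).foldl mtStep d := by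
  induction kws generalizing d with
  | nil => rfl
  | cons kw rest ih =>
    simp only [List.foldl_cons, List.filterMap_cons]
    by_cases h : kw = ""
    · simp only [h]
      exact ih d
    · simp only [if_neg h]
      exact ih _

-- the whole grouping = one fold of mtStep over mtCands
theorem byLen_eq (key_to_keywords : List (String × List String)) :
    matchTagsByLen key_to_keywords = (mtCands key_to_keywords).foldl mtStep PySem.Dict.empty := by
  unfold matchTagsByLen mtCands
  generalize PySem.Dict.empty = d
  induction key_to_keywords generalizing d with
  | nil => rfl
  | cons q rest ih =>
    simp only [List.foldl_cons, List.flatMap_cons, List.foldl_append]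
    rw [byLen_inner_eq q.2 d]
    exact ih _

theorem byLen_nodup_keys (key_to_keywords : List (String × List String)) :
    (matchTagsByLen key_to_keywords).keys.Nodup := by
  rw [byLen_eq]
  exact PySem.Dict.nodup_keys_foldl_modify_key _ (fun k => PySem.Str.len k) PySem.Set.empty
    (fun _ k => fun s => PySem.Set.add s k) _ PySem.Dict.nodup_keys_empty

-- bucket membership of the grouping fold
theorem mem_getD_foldl_mtStep (l : List String) (d : PySem.Dict Int (PySem.Set String)) (L : Int) (y : String) :
    (y ∈ (l.foldl mtStep d).getD L PySem.Set.empty)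
      ↔ y ∈ d.getD L PySem.Set.empty ∨ (y ∈ l ∧ PySem.Str.len y = L) := by
  induction l generalizing d with
  | nil => simp
  | cons k rest ih =>
    rw [List.foldl_cons, ih]
    have hstep : (y ∈ (mtStep d k).getD L PySem.Set.empty)
        ↔ y ∈ d.getD L PySem.Set.empty ∨ (y = k ∧ PySem.Str.len y = L) := by
      unfold mtStep
      rw [PySem.Dict.getD_modify]
      by_cases hL : L = PySem.Str.len k
      · rw [if_pos hL, PySem.Set.mem_add]
        constructor
        · rintro (hy | hy)
          · exact Or.inl (hL ▸ hy)
          · exact Or.inr ⟨hy, by rw [hy, hL]⟩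
        · rintro (hy | ⟨hy, _⟩)
          · exact Or.inl (hL ▸ hy)
          · exact Or.inr hy
      · rw [if_neg hL]
        constructor
        · exact Or.inl
        · rintro (hy | ⟨hy, hlen⟩)
          · exact hy
          · exact absurd (hy ▸ hlen).symm hL
    rw [hstep]
    constructor
    · rintro ((hy | ⟨hy, hlen⟩) | ⟨hy, hlen⟩)
      · exact Or.inl hy
      · exact Or.inr ⟨by rw [hy]; exact List.mem_cons_self, hlen⟩
      · exact Or.inr ⟨List.mem_cons.mpr (Or.inr hy), hlen⟩
    · rintro (hy | ⟨hy, hlen⟩)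
      · exact Or.inl (Or.inl hy)
      · rcases List.mem_cons.mp hy with hy | hy
        · exact Or.inl (Or.inr ⟨hy, hlen⟩)
        · exact Or.inr ⟨hy, hlen⟩

-- membership in mtCands
theorem mem_mtCands (key_to_keywords : List (String × List String)) (x : String) :
    x ∈ mtCands key_to_keywords
      ↔ ∃ q ∈ key_to_keywords, ∃ kw ∈ q.2, kw ≠ "" ∧ PySem.Str.lower kw = x := by
  unfold mtCands
  rw [List.mem_flatMap]
  constructor
  · rintro ⟨q, hq, hmem⟩
    rw [List.mem_filterMap] at hmem
    obtain ⟨kw, hkw, heq⟩ := hmem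
    by_cases h : kw = ""
    · simp [h] at heq
    · rw [if_neg h] at heq
      injection heq with h1
      exact ⟨q, hq, kw, hkw, h, h1⟩
  · rintro ⟨q, hq, kw, hkw, hne, hx⟩
    refine ⟨q, hq, ?_⟩
    rw [List.mem_filterMap]
    exact ⟨kw, hkw, by rw [if_neg hne, hx]⟩

-- membership in the per-position scan fold
theorem mem_scanPos (items : List (Int × PySem.Set String)) (text : String)
    (s0 : PySem.Set String) (i : Int) (x : String) :
    (x ∈ matchTagsScanPos items text s0 i)
      ↔ x ∈ s0 ∨ ∃ q ∈ items,
          PySem.Set.contains q.2 (PySem.Str.slice text (some i) (some (i + q.1))) = true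
            ∧ x = PySem.Str.slice text (some i) (some (i + q.1)) := by
  unfold matchTagsScanPos
  induction items generalizing s0 with
  | nil => simp
  | cons q rest ih =>
    simp only [List.foldl_cons, List.mem_cons]
    by_cases h : PySem.Set.contains q.2 (PySem.Str.slice text (some i) (some (i + q.1))) = true
    · rw [if_pos h, ih, PySem.Set.mem_add]
      constructor
      · rintro (⟨hx | hx⟩ | ⟨r, hr, hc, hx⟩)
        · exact Or.inl hx
        · exact Or.inr ⟨q, Or.inl rfl, h, hx⟩
        · exact Or.inr ⟨r, Or.inr hr, hc, hx⟩
      · rintro (hx | ⟨r, hr | hr, hc, hx⟩)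
        · exact Or.inl (Or.inl hx)
        · exact Or.inl (Or.inr (hr ▸ hx))
        · exact Or.inr ⟨r, hr, hc, hx⟩
    · rw [if_neg h, ih]
      constructor
      · rintro (hx | ⟨r, hr, hc, hx⟩)
        · exact Or.inl hx
        · exact Or.inr ⟨r, Or.inr hr, hc, hx⟩
      · rintro (hx | ⟨r, hr | hr, hc, hx⟩)
        · exact Or.inl hx
        · exact absurd (hr ▸ hc) h
        · exact Or.inr ⟨r, hr, hc, hx⟩

-- membership in the full scan
theorem mem_found (text : String) (items : List (Int × PySem.Set String)) (x : String) :
    (x ∈ matchTagsFound text items)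
      ↔ ∃ i ∈ PySem.List.pyRange 0 (PySem.Str.len text), ∃ q ∈ items,
          PySem.Set.contains q.2 (PySem.Str.slice text (some i) (some (i + q.1))) = true
            ∧ x = PySem.Str.slice text (some i) (some (i + q.1)) := by
  unfold matchTagsFound
  generalize PySem.List.pyRange 0 (PySem.Str.len text) = l
  have : ∀ (l : List Int) (s0 : PySem.Set String),
      (x ∈ l.foldl (matchTagsScanPos items text) s0)
        ↔ x ∈ s0 ∨ ∃ i ∈ l, ∃ q ∈ items,
            PySem.Set.contains q.2 (PySem.Str.slice text (some i) (some (i + q.1))) = true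
              ∧ x = PySem.Str.slice text (some i) (some (i + q.1)) := by
    intro l
    induction l with
    | nil => simp
    | cons i rest ih =>
      intro s0
      simp only [List.foldl_cons, List.mem_cons]
      rw [ih, mem_scanPos]
      constructor
      · rintro (⟨hx | hx⟩ | ⟨j, hj, hrest⟩)
        · exact Or.inl hx
        · exact Or.inr ⟨i, Or.inl rfl, hx⟩
        · exact Or.inr ⟨j, Or.inr hj, hrest⟩
      · rintro (hx | ⟨j, hj | hj, hrest⟩)
        · exact Or.inl (Or.inl hx)
        · exact Or.inl (Or.inr (hj ▸ hrest))
        · exact Or.inr ⟨j, hj, hrest⟩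
  rw [this l PySem.Set.empty]
  simp [PySem.Set.empty]

-- the central fact: a non-empty candidate is in 'found' exactly when it occurs in the text
theorem mem_found_iff_isIn (text : String) (key_to_keywords : List (String × List String))
    (x : String) (hx : x ∈ mtCands key_to_keywords) (hne : x.toList ≠ []) :
    (x ∈ matchTagsFound text (matchTagsByLen key_to_keywords).items)
      ↔ PySem.Str.isIn x text = true := by
  rw [mem_found]
  constructor
  · rintro ⟨i, hi, q, hq, hc, hxeq⟩
    rw [PySem.List.mem_pyRange_one] at hi
    -- the bucket q.2 is the getD at q.1, so the slice is a candidate with length q.1 ≥ 0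
    have hbucket : q.2 = (matchTagsByLen key_to_keywords).getD q.1 PySem.Set.empty := by
      obtain ⟨w, pats⟩ := q
      exact (PySem.Dict.getD_of_mem_items _ hq (byLen_nodup_keys key_to_keywords) _).symm
    rw [PySem.Set.contains_iff, hbucket, byLen_eq, mem_getD_foldl_mtStep] at hc
    rcases hc with hc | ⟨_, hlen⟩
    · exact absurd hc (by simp [PySem.Dict.getD_empty, PySem.Set.empty])
    -- q.1 = length of the slice's value ≥ 0; rewrite indices as naturals
    have hL : q.1 = PySem.Str.len (PySem.Str.slice text (some i) (some (i + q.1))) := hlen.symm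
    have hi0 : 0 ≤ i := hi.1
    have hL0 : 0 ≤ q.1 := by
      rw [hL, PySem.Str.len_eq]
      positivity
    -- x = the slice = take of drop, hence a prefix of a drop, hence isIn
    rw [PySem.Str.isIn_eq, ← PySem.Chars.exists_prefix_drop_iff_isIn]
    refine ⟨i.toNat, ?_⟩
    have hchars : x.toList = ((text.toList.drop i.toNat).take q.1.toNat) := by
      rw [hxeq, PySem.Str.toList_slice, PySem.Chars.slice_eq_listSlice]
      have : PySem.List.slice text.toList (some i) (some (i + q.1))
          = PySem.List.slice text.toList (some ((i.toNat : Nat) : Int))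
              (some (((i.toNat : Nat) : Int) + ((q.1.toNat : Nat) : Int))) := by
        rw [Int.toNat_of_nonneg hi0, Int.toNat_of_nonneg hL0]
      rw [this, PySem.List.slice_natCast_add]
    rw [hchars]
    exact List.take_prefix _ _
  · intro hin
    rw [PySem.Str.isIn_eq, ← PySem.Chars.exists_prefix_drop_iff_isIn] at hin
    obtain ⟨j, hpre⟩ := hin
    have hjlt : j < text.toList.length := by
      by_contra hge
      rw [List.drop_eq_nil_of_le (by omega)] at hpre
      exact hne (List.prefix_nil.mp hpre)
    -- the bucket at x's length exists and contains x
    have hxg : x ∈ (matchTagsByLen key_to_keywords).getD (PySem.Str.len x) PySem.Set.empty := by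
      rw [byLen_eq, mem_getD_foldl_mtStep]
      exact Or.inr ⟨hx, rfl⟩
    rcases hget : PySem.Dict.get? (matchTagsByLen key_to_keywords) (PySem.Str.len x) with _ | pats
    · rw [PySem.Dict.getD_eq_get?_getD, hget] at hxg
      exact absurd hxg (by simp [PySem.Set.empty])
    have hxp : x ∈ pats := by
      rw [PySem.Dict.getD_eq_get?_getD, hget] at hxg
      exact hxg
    have hslice : PySem.Str.slice text (some (j : Int)) (some ((j : Int) + PySem.Str.len x)) = x := by
      rw [← String.toList_inj, PySem.Str.toList_slice, PySem.Chars.slice_eq_listSlice,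
        PySem.Str.len_eq, PySem.List.slice_natCast_add]
      exact ((List.prefix_iff_eq_take.mp hpre).symm)
    refine ⟨(j : Int), ?_, (PySem.Str.len x, pats),
        PySem.Dict.mem_items_of_get?_eq_some _ hget, ?_, ?_⟩
    · rw [PySem.List.mem_pyRange_one, PySem.Str.len_eq]
      omega
    · rw [hslice]
      exact (PySem.Set.contains_iff _ _).mpr hxp
    · exact hslice.symm

-- boolean form for one keyword of one key
theorem contains_found_eq (text : String) (key_to_keywords : List (String × List String))
    (p : String × List String) (hp : p ∈ key_to_keywords) (kw : String) (hkw : kw ∈ p.2) (hne : kw ≠ "") :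
    PySem.Set.contains (matchTagsFound text (matchTagsByLen key_to_keywords).items) (PySem.Str.lower kw)
      = PySem.Str.isIn (PySem.Str.lower kw) text := by
  have hx : PySem.Str.lower kw ∈ mtCands key_to_keywords :=
    (mem_mtCands _ _).mpr ⟨p, hp, kw, hkw, hne, rfl⟩
  have hne' : (PySem.Str.lower kw).toList ≠ [] := by
    rw [PySem.Str.toList_lower]
    simp only [PySem.Chars.lower]
    intro h
    exact hne (String.toList_inj.mp (by simpa using h))
  have hiff := mem_found_iff_isIn text key_to_keywords (PySem.Str.lower kw) hx hne'
  by_cases h : PySem.Str.isIn (PySem.Str.lower kw) text = true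
  · rw [h, PySem.Set.contains_iff, hiff]
    exact h
  · simp only [Bool.not_eq_true] at h
    rw [h, ← Bool.not_eq_true, PySem.Set.contains_iff, hiff, h]
    simp

-- any over a list depends only on the predicate's values on its members
theorem anyCongrMem {α : Type} {l : List α} {f g : α → Bool} (h : ∀ a ∈ l, f a = g a) :
    l.any f = l.any g := by
  induction l with
  | nil => rfl
  | cons a t ih =>
    simp only [List.any_cons, h a List.mem_cons_self,
      ih (fun x hx => h x (List.mem_cons_of_mem _ hx))]

-- ===== VERDICT (by name: the statement is the Claim_ definition above) =====
theorem match_tags_spec : Claim_equal_match_tags := by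
  intro title abstract key_to_keywords key_to_label _
  unfold Spec_match_tags
  simp only [match_tags, match_tags_alt]
  rw [matchTagsOuter_eq, List.nil_append]
  have hf : key_to_keywords.filter
        (fun p => p.2.any (fun kw => kw ≠ "" && PySem.Set.contains
          (matchTagsFound (PySem.Str.lower title ++ " " ++ PySem.Str.lower abstract)
            (matchTagsByLen key_to_keywords).items) (PySem.Str.lower kw)))
      = key_to_keywords.filter
        (fun p => p.2.any (fun kw => kw ≠ "" && PySem.Str.isIn (PySem.Str.lower kw)
          (PySem.Str.lower title ++ " " ++ PySem.Str.lower abstract))) := by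
    apply List.filter_congr
    intro p hp
    apply anyCongrMem
    intro kw hkw
    by_cases hne : kw = ""
    · simp [hne]
    · rw [contains_found_eq _ key_to_keywords p hp kw hkw hne]
  rw [hf]
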